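-- pv_equiv track=rewrite | github.com/darjoo/AdventOfCode | 2023/Day 3/Part 1.py | BuildNumbers
-- ===== SOURCE A (Python) =====
-- def BuildNumbers(input: list[str]) -> list[int]:
--     numbers = []
--     p1, p2 = -1, -1
--     num = 0
--     for idx, c in enumerate(input):
--         if c.isnumeric():
--             num *= 10
--             num += int(c)
--             if p1 == -1:
--                 p1 = idx
--                 p2 = idx+1
--             else:
--                 p2 = idx+1
--         else:
--             for _ in range(p1, p2):
--                 numbers.append(num)
--             if c == '.':
--                 numbers.append(0)
--             else:
--                 numbers.append(-1)
--             num = 0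
--             p1, p2 = -1, -1
--
--     if p1 != -1:
--         for _ in range(p1, p2):
--             numbers.append(num)
--
--     return numbers
-- ===== SOURCE B (Python) =====
-- def BuildNumbers(input: list[str]) -> list[int]:
--     result = []
--     n = len(input)
--     i = 0
--     while i < n:
--         if input[i].isnumeric():
--             # lookahead: read the whole numeric run first, then fill its positions
--             num = 0
--             j = i
--             while j < n and input[j].isnumeric():
--                 num = num * 10 + int(input[j])
--                 j += 1
--             result.extend([num] * (j - i))
--             i = j
--         else:
--             result.append(0 if input[i] == '.' else -1)
--             i += 1
--     return result
-- ===== Notes on version B (the rewrite author's own statement) =====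
-- stated objective: alternative
-- what changed: B replaces A's stateful accumulate-and-flush-on-separator scan (carrying p1/p2 run bounds and a pending num across iterations) with a two-pointer lookahead: at each run start it reads the whole numeric run to compute its value, then fills all its positions at once.
import Mathlib
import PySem

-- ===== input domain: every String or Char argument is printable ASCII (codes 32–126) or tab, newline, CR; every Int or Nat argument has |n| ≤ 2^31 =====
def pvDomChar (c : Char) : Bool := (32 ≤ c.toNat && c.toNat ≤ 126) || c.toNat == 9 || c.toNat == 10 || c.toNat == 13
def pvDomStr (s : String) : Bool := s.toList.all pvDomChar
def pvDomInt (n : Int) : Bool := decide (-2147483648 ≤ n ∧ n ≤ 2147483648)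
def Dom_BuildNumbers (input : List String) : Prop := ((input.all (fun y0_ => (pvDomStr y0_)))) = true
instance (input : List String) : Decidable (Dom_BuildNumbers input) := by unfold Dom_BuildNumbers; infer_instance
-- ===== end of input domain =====

-- B replaces A's accumulate-and-flush-on-separator scan by a two-pointer lookahead
-- that reads each numeric run first and then fills all its positions at once
-- (objective: alternative decomposition, same O(n) cost).

-- ===== PORT A =====

-- c.isnumeric() ported as strIsdigit (exact on the ASCII domain Dom_BuildNumbers);
-- int(c) ported as (ofStr? c).getD 0 — exact here: it is only reached when c is a
-- nonempty all-digit string, on which ofStr? always returns some value.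
def pvVal (c : String) : Int := (PySem.Int.ofStr? c).getD 0

-- the body of A's 'for idx, c in enumerate(input)' loop; state = (numbers, p1, p2, num)
def pvStepA (st : List Int × Int × Int × Int) (p : Int × String) : List Int × Int × Int × Int :=
  let (numbers, p1, p2, num) := st
  let (idx, c) := p
  if PySem.Str.strIsdigit c then
    let num := num * 10 + pvVal c
    if p1 = -1 then (numbers, idx, idx + 1, num)
    else (numbers, p1, idx + 1, num)
  else
    ((numbers ++ (PySem.List.pyRange p1 p2 1).map (fun _ => num)) ++
       [if c = "." then (0 : Int) else -1], -1, -1, 0)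

def BuildNumbers (input : List String) : List Int :=
  let st := (PySem.List.enumerate input 0).foldl pvStepA ([], -1, -1, 0)
  let (numbers, p1, p2, num) := st
  if p1 ≠ -1 then numbers ++ (PySem.List.pyRange p1 p2 1).map (fun _ => num)
  else numbers

-- ===== PORT B =====

-- B's inner 'while j < n and input[j].isnumeric()' lookahead: returns
-- (num accumulated over the run, run length, remaining suffix after the run)
def pvScanRun (num : Int) : List String → Int × Nat × List String
  | [] => (num, 0, [])
  | c :: t =>
    if PySem.Str.strIsdigit c then
      let r := pvScanRun (num * 10 + pvVal c) t
      (r.1, r.2.1 + 1, r.2.2)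
    else (num, 0, c :: t)

theorem pvScanRun_length : ∀ (t : List String) (num : Int),
    (pvScanRun num t).2.2.length ≤ t.length := by
  intro t
  induction t with
  | nil => intro num; simp [pvScanRun]
  | cons c t ih =>
    intro num
    simp only [pvScanRun]
    split
    · exact Nat.le_succ_of_le (ih _)
    · simp

-- B's outer while loop over i, as recursion on the not-yet-processed suffix
def pvAltGo : List String → List Int
  | [] => []
  | c :: t =>
    if h : PySem.Str.strIsdigit c then
      let r := pvScanRun 0 (c :: t)
      List.replicate r.2.1 r.1 ++ pvAltGo r.2.2
    else (if c = "." then (0 : Int) else -1) :: pvAltGo t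
termination_by l => l.length
decreasing_by
  · simp only [pvScanRun, h, if_pos]
    exact Nat.lt_succ_of_le (pvScanRun_length _ _)
  · simp

def BuildNumbers_alt (input : List String) : List Int := pvAltGo input

-- ===== PRECONDITION & SPEC =====
def Spec_BuildNumbers (input : List String) (out : List Int) : Prop := out = BuildNumbers_alt input
instance (input : List String) (out : List Int) : Decidable (Spec_BuildNumbers input out) := by unfold Spec_BuildNumbers; infer_instance

-- ===== CLAIM (what is proved, stated in full; the proofs are below) =====
def Claim_equal_BuildNumbers : Prop := ∀ (input : List String), Dom_BuildNumbers input → Spec_BuildNumbers input (BuildNumbers input)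

-- ===== LEMMAS AND PROOFS =====

-- A's final 'if p1 != -1: flush' step
def pvFinish (st : List Int × Int × Int × Int) : List Int :=
  if st.2.1 ≠ -1 then st.1 ++ (PySem.List.pyRange st.2.1 st.2.2.1 1).map (fun _ => st.2.2.2)
  else st.1

-- proof-side continuation: A's behaviour with a pending run of length k and value num
def pvContB (num : Int) (k : Nat) : List String → List Int
  | [] => List.replicate k num
  | c :: t =>
    if PySem.Str.strIsdigit c then pvContB (num * 10 + pvVal c) (k + 1) t
    else List.replicate k num ++ (if c = "." then (0 : Int) else -1) :: pvContB 0 0 t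

theorem pvMap_const_pyRange (a b num : Int) :
    (PySem.List.pyRange a b 1).map (fun _ => num) = List.replicate (b - a).toNat num := by
  rw [List.map_const']
  rw [PySem.List.length_pyRange_one]

theorem pvLoopA : ∀ (l : List String) (idx : Int) (numbers : List Int) (num : Int) (k : Nat),
    0 ≤ idx → (k : Int) ≤ idx →
    pvFinish ((PySem.List.enumerate l idx).foldl pvStepA
      (numbers, (if k = 0 then -1 else idx - k), (if k = 0 then -1 else idx), num)) =
    numbers ++ pvContB num k l := by
  intro l
  induction l with
  | nil =>
    intro idx numbers num k h0 hk
    simp only [PySem.List.enumerate_nil, List.foldl_nil, pvContB]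
    rcases k with _ | k
    · simp [pvFinish]
    · have hne : idx - ((k + 1 : Nat) : Int) ≠ -1 := by push_cast at hk ⊢; omega
      rw [if_neg (Nat.succ_ne_zero k), if_neg (Nat.succ_ne_zero k)]
      unfold pvFinish
      dsimp only
      rw [if_pos (by simpa using hne)]
      rw [pvMap_const_pyRange]
      congr 1
      congr 1
      omega
  | cons c t ih =>
    intro idx numbers num k h0 hk
    rw [PySem.List.enumerate_cons, List.foldl_cons]
    by_cases hd : PySem.Str.strIsdigit c
    · have hcont : pvContB num k (c :: t) = pvContB (num * 10 + pvVal c) (k + 1) t := by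
        simp only [pvContB]; rw [if_pos hd]
      rw [hcont]
      rcases k with _ | k
      · simp only [pvStepA]
        rw [if_pos hd]
        simp only [reduceIte]
        have := ih (idx + 1) numbers (num * 10 + pvVal c) 1 (by omega) (by push_cast; omega)
        rw [if_neg one_ne_zero, if_neg one_ne_zero] at this
        push_cast at this
        simpa using this
      · have hne : idx - ((k + 1 : Nat) : Int) ≠ -1 := by push_cast at hk ⊢; omega
        simp only [pvStepA]
        rw [if_pos hd]
        simp only [Nat.succ_ne_zero, reduceIte]
        rw [if_neg hne]
        have := ih (idx + 1) numbers (num * 10 + pvVal c) (k + 2) (by omega) (by push_cast at hk ⊢; omega)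
        rw [if_neg (Nat.succ_ne_zero (k + 1)), if_neg (Nat.succ_ne_zero (k + 1))] at this
        have harg : idx + 1 - ((k + 2 : Nat) : Int) = idx - ((k + 1 : Nat) : Int) := by push_cast; ring
        rw [harg] at this
        exact this
    · have hcont : pvContB num k (c :: t) =
          List.replicate k num ++ (if c = "." then (0 : Int) else -1) :: pvContB 0 0 t := by
        simp only [pvContB]; rw [if_neg hd]
      rw [hcont]
      simp only [pvStepA]
      rw [if_neg hd]
      have := ih (idx + 1) ((numbers ++ (PySem.List.pyRange (if k = 0 then -1 else idx - k)
        (if k = 0 then -1 else idx) 1).map (fun _ => num)) ++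
        [if c = "." then (0 : Int) else -1]) 0 0 (by omega) (by omega)
      rw [if_pos rfl, if_pos rfl] at this
      rw [this]
      have hrep : (PySem.List.pyRange (if k = 0 then -1 else idx - k)
          (if k = 0 then -1 else idx) 1).map (fun _ => num) = List.replicate k num := by
        rcases k with _ | k
        · simp [PySem.List.pyRange_one_eq_nil]
        · rw [if_neg (Nat.succ_ne_zero k), if_neg (Nat.succ_ne_zero k), pvMap_const_pyRange]
          congr 1
          omega
      rw [hrep]
      simp

-- bridging pvContB to B's lookahead recursion (both parts at once, by strong induction on length)
theorem pvContB_alt : ∀ (n : Nat) (l : List String), l.length ≤ n →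
    ((∀ (num : Int) (k : Nat), pvContB num k l =
        List.replicate (k + (pvScanRun num l).2.1) (pvScanRun num l).1 ++
          pvAltGo (pvScanRun num l).2.2) ∧
      pvContB 0 0 l = pvAltGo l) := by
  intro n
  induction n with
  | zero =>
    intro l hl
    have : l = [] := List.eq_nil_of_length_eq_zero (Nat.le_zero.mp hl)
    subst this
    constructor
    · intro num k; simp [pvContB, pvScanRun, pvAltGo]
    · simp [pvContB, pvAltGo]
  | succ n ih =>
    intro l hl
    rcases l with _ | ⟨c, t⟩
    · constructor
      · intro num k; simp [pvContB, pvScanRun, pvAltGo]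
      · simp [pvContB, pvAltGo]
    · have ht : t.length ≤ n := by simpa using hl
      have part1 : ∀ (num : Int) (k : Nat), pvContB num k (c :: t) =
          List.replicate (k + (pvScanRun num (c :: t)).2.1) (pvScanRun num (c :: t)).1 ++
            pvAltGo (pvScanRun num (c :: t)).2.2 := by
        intro num k
        by_cases hd : PySem.Str.strIsdigit c
        · have hcont : pvContB num k (c :: t) = pvContB (num * 10 + pvVal c) (k + 1) t := by
            simp only [pvContB]; rw [if_pos hd]
          have hscan : pvScanRun num (c :: t) =
              ((pvScanRun (num * 10 + pvVal c) t).1,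
               (pvScanRun (num * 10 + pvVal c) t).2.1 + 1,
               (pvScanRun (num * 10 + pvVal c) t).2.2) := by
            simp only [pvScanRun]; rw [if_pos hd]
          rw [hcont, (ih t ht).1, hscan]
          dsimp only
          congr 1
          congr 1
          omega
        · have hcont : pvContB num k (c :: t) =
              List.replicate k num ++ (if c = "." then (0 : Int) else -1) :: pvContB 0 0 t := by
            simp only [pvContB]; rw [if_neg hd]
          have hscan : pvScanRun num (c :: t) = (num, 0, c :: t) := by
            simp only [pvScanRun]; rw [if_neg hd]
          have halt : pvAltGo (c :: t) = (if c = "." then (0 : Int) else -1) :: pvAltGo t := by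
            rw [pvAltGo]; rw [dif_neg hd]
          rw [hcont, (ih t ht).2, hscan, halt]
          simp
      refine ⟨part1, ?_⟩
      by_cases hd : PySem.Str.strIsdigit c
      · have hcont : pvContB 0 0 (c :: t) = pvContB (pvVal c) 1 t := by
          simp only [pvContB]; rw [if_pos hd]; norm_num
        have halt : pvAltGo (c :: t) =
            List.replicate ((pvScanRun 0 (c :: t)).2.1) (pvScanRun 0 (c :: t)).1 ++
              pvAltGo (pvScanRun 0 (c :: t)).2.2 := by
          rw [pvAltGo]; rw [dif_pos hd]
        have hscan : pvScanRun 0 (c :: t) =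
            ((pvScanRun (pvVal c) t).1, (pvScanRun (pvVal c) t).2.1 + 1,
             (pvScanRun (pvVal c) t).2.2) := by
          simp only [pvScanRun]; rw [if_pos hd]; norm_num
        rw [hcont, (ih t ht).1, halt, hscan]
        dsimp only
        congr 1
        congr 1
        omega
      · have hcont : pvContB 0 0 (c :: t) =
            (if c = "." then (0 : Int) else -1) :: pvContB 0 0 t := by
          simp only [pvContB]; rw [if_neg hd]; simp
        have halt : pvAltGo (c :: t) = (if c = "." then (0 : Int) else -1) :: pvAltGo t := by
          rw [pvAltGo]; rw [dif_neg hd]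
        rw [hcont, (ih t ht).2, halt]

-- ===== VERDICT (by name: the statement is the Claim_ definition above) =====
theorem BuildNumbers_spec : Claim_equal_BuildNumbers := by
  intro input _
  unfold Spec_BuildNumbers BuildNumbers BuildNumbers_alt
  have h := pvLoopA input 0 [] 0 0 (le_refl 0) (by simp)
  rw [if_pos rfl, if_pos rfl] at h
  have hfin : ∀ st : List Int × Int × Int × Int,
      (let (numbers, p1, p2, num) := st
       if p1 ≠ -1 then numbers ++ (PySem.List.pyRange p1 p2 1).map (fun _ => num)
       else numbers) = pvFinish st := by
    intro st; rcases st with ⟨a, b, c, d⟩; rfl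
  rw [hfin, h]
  rw [(pvContB_alt input.length input (le_refl _)).2]
  simp
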